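-- pv_equiv track=rewrite | github.com/iansawicki/cosmic-bon-voyage | sbase_embeddings_rerun.py | _guess_text_columns
-- ===== SOURCE A (Python) =====
-- TEXT_SIGNAL_NAMES = (
--     "title",
--     "name",
--     "track_title",
--     "song",
--     "artist",
--     "artists",
--     "album",
--     "album_name",
--     "genre",
--     "genres",
--     "mood",
--     "tags",
--     "label",
--     "year",
--     "bpm",
--     "key",
--     "description",
--     "lyrics_snippet",
-- )
--
-- def _guess_text_columns(columns: list[str]) -> list[str]:
--     lower = {c.lower(): c for c in columns}
--     picked: list[str] = []
--     for hint in TEXT_SIGNAL_NAMES: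
--         if hint in lower:
--             picked.append(lower[hint])
--     # De-dupe preserve order
--     seen: set[str] = set()
--     return [c for c in picked if c not in seen and not seen.add(c)]
-- ===== SOURCE B (Python) =====
-- TEXT_SIGNAL_NAMES = (
--     "title",
--     "name",
--     "track_title",
--     "song",
--     "artist",
--     "artists",
--     "album",
--     "album_name",
--     "genre",
--     "genres",
--     "mood",
--     "tags",
--     "label",
--     "year",
--     "bpm",
--     "key",
--     "description",
--     "lyrics_snippet",
-- )
--
--
-- def _guess_text_columns(columns: list[str]) -> list[str]:
--     rank = {name: i for i, name in enumerate(TEXT_SIGNAL_NAMES)}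
--     matches: dict[str, str] = {}
--     for c in columns:
--         lc = c.lower()
--         if lc in rank:
--             matches[lc] = c  # later duplicates overwrite earlier ones, like A's dict
--     return [matches[k] for k in sorted(matches, key=rank.__getitem__)]
-- ===== Notes on version B (the rewrite author's own statement) =====
-- stated objective: alternative
-- what changed: Instead of building a dict of all columns and scanning the fixed hint tuple (plus a dedup pass), B makes one pass over the columns keeping only hint-matching ones in a rank-keyed dict and emits them sorted by hint rank; no dedup pass is needed.
import Mathlib
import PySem

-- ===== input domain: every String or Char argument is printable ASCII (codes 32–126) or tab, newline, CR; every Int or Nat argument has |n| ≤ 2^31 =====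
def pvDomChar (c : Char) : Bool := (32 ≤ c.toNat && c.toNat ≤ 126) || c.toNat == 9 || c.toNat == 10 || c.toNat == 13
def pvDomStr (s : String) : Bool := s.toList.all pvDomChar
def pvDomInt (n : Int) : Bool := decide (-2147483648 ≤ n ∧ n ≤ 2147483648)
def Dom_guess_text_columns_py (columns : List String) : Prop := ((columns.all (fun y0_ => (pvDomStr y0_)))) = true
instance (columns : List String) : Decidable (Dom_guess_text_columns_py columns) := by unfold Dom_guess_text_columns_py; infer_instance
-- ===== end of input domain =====

-- B replaces A's scan of the fixed hint tuple over a dict of all columns (plus a dedup pass)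
-- by one filtering pass over the columns and a sort of the matched keys by hint rank (objective: alternative).


-- module constant TEXT_SIGNAL_NAMES (shared by both Pythons)
def pvHints : List String :=
  ["title", "name", "track_title", "song", "artist", "artists", "album", "album_name",
   "genre", "genres", "mood", "tags", "label", "year", "bpm", "key", "description",
   "lyrics_snippet"]

-- ===== PORT A =====
-- the de-dup comprehension `[c for c in picked if c not in seen and not seen.add(c)]`
def pvDedupe : List String → PySem.Set String → List String
  | [], _ => []
  | c :: rest, seen =>
      if seen.contains c then pvDedupe rest seen
      else c :: pvDedupe rest (seen.add c)

def guess_text_columns_py (columns : List String) : List String :=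
  let lower := columns.foldl (fun d c => d.insert (PySem.Str.lower c) c)
      (PySem.Dict.empty : PySem.Dict String String)
  let picked := pvHints.foldl
      (fun acc hint => if lower.contains hint then acc ++ [lower.getD hint ""] else acc) []
  pvDedupe picked PySem.Set.empty

-- ===== PORT B =====
def pvRank : PySem.Dict String Int :=
  PySem.Dict.ofList ((PySem.List.enumerate pvHints).map (fun p => (p.2, p.1)))

def guess_text_columns_py_alt (columns : List String) : List String :=
  let ms := columns.foldl
      (fun d c =>
        let lc := PySem.Str.lower c
        if pvRank.contains lc then d.insert lc c else d)
      (PySem.Dict.empty : PySem.Dict String String)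
  (PySem.List.sorted ms.keys (fun k => pvRank.getD k 0) false).map
      (fun k => ms.getD k "")

-- ===== PRECONDITION & SPEC =====
def Spec_guess_text_columns_py (columns : List String) (out : List String) : Prop := out = guess_text_columns_py_alt columns
instance (columns : List String) (out : List String) : Decidable (Spec_guess_text_columns_py columns out) := by unfold Spec_guess_text_columns_py; infer_instance

-- ===== CLAIM (what is proved, stated in full; the proofs are below) =====
def Claim_equal_guess_text_columns_py : Prop := ∀ (columns : List String), Dom_guess_text_columns_py columns → Spec_guess_text_columns_py columns (guess_text_columns_py columns)

-- ===== LEMMAS AND PROOFS =====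

-- A's lower dict and B's matches dict, as named folds
def pvLowD (columns : List String) : PySem.Dict String String :=
  columns.foldl (fun d c => d.insert (PySem.Str.lower c) c) PySem.Dict.empty

def pvMatD (columns : List String) : PySem.Dict String String :=
  columns.foldl
    (fun d c =>
      let lc := PySem.Str.lower c
      if pvRank.contains lc then d.insert lc c else d) PySem.Dict.empty

-- A's picked loop is a filterMap of lookups
theorem pv_foldA (d : PySem.Dict String String) :
    ∀ (H : List String) (acc : List String),
      H.foldl (fun acc hint => if d.contains hint then acc ++ [d.getD hint ""] else acc) acc
        = acc ++ H.filterMap (fun h => d.get? h) := by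
  intro H
  induction H with
  | nil => intro acc; simp
  | cons h t ih =>
      intro acc
      simp only [List.foldl_cons, List.filterMap_cons]
      rw [PySem.Dict.contains_eq_isSome_get?]
      cases hd : d.get? h with
      | none => simp [ih]
      | some v =>
          rw [ih]
          simp [PySem.Dict.getD_eq_get?_getD, hd]

-- invariant of the lower dict: a stored value lowercases to its key
theorem pv_lowD_inv_aux (cols : List String) :
    ∀ (d : PySem.Dict String String),
      (∀ h v, d.get? h = some v → PySem.Str.lower v = h) →
      (∀ h v, (cols.foldl (fun d c => d.insert (PySem.Str.lower c) c) d).get? h = some v →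
        PySem.Str.lower v = h) := by
  induction cols with
  | nil => intro d hd; simpa using hd
  | cons c t ih =>
      intro d hd
      simp only [List.foldl_cons]
      refine ih _ ?_
      intro h v hv
      rw [PySem.Dict.get?_insert] at hv
      split at hv
      · rename_i he; cases hv; exact he.symm
      · exact hd h v hv

theorem pv_lowD_inv (columns : List String) :
    ∀ h v, (pvLowD columns).get? h = some v → PySem.Str.lower v = h := by
  refine pv_lowD_inv_aux columns PySem.Dict.empty ?_
  intro h v hv
  simp [PySem.Dict.get?_empty] at hv

-- the de-dup pass is the identity on a Nodup list of fresh elements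
theorem pv_dedupe_id : ∀ (l : List String) (seen : PySem.Set String),
    l.Nodup → (∀ x ∈ l, x ∉ seen) → pvDedupe l seen = l := by
  intro l
  induction l with
  | nil => intro seen _ _; rfl
  | cons c t ih =>
      intro seen hnd hf
      have hc : ¬ c ∈ seen := hf c (by simp)
      unfold pvDedupe
      rw [if_neg (by simpa [PySem.Set.contains_iff] using hc)]
      congr 1
      refine ih _ hnd.of_cons ?_
      intro x hx
      rw [PySem.Set.mem_add]
      push Not
      exact ⟨hf x (by simp [hx]), fun he => (List.nodup_cons.mp hnd).1 (he ▸ hx)⟩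

-- B's matches dict is A's lower dict restricted to rank keys
theorem pv_matD_rel_aux (cols : List String) :
    ∀ (dA dB : PySem.Dict String String),
      (∀ h, dB.get? h = if pvRank.contains h then dA.get? h else none) →
      (∀ h,
        (cols.foldl (fun d c =>
          let lc := PySem.Str.lower c
          if pvRank.contains lc then d.insert lc c else d) dB).get? h
        = if pvRank.contains h then
            (cols.foldl (fun d c => d.insert (PySem.Str.lower c) c) dA).get? h
          else none) := by
  induction cols with
  | nil => intro dA dB hrel; simpa using hrel
  | cons c t ih =>
      intro dA dB hrel
      simp only [List.foldl_cons]
      refine ih _ _ ?_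
      intro h
      by_cases hr : pvRank.contains (PySem.Str.lower c) = true
      · simp only [hr, if_true]
        rw [PySem.Dict.get?_insert, PySem.Dict.get?_insert]
        by_cases he : h = PySem.Str.lower c
        · simp [he, hr]
        · simp only [if_neg he]; exact hrel h
      · simp only [Bool.not_eq_true] at hr
        simp only [hr, Bool.false_eq_true, if_false]
        rw [PySem.Dict.get?_insert]
        by_cases he : h = PySem.Str.lower c
        · subst he; rw [hrel]; simp [hr]
        · simp only [if_neg he]; exact hrel h

theorem pv_matD_rel (columns : List String) (h : String) :
    (pvMatD columns).get? h = if pvRank.contains h then (pvLowD columns).get? h else none := by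
  refine pv_matD_rel_aux columns PySem.Dict.empty PySem.Dict.empty ?_ h
  intro h; simp [PySem.Dict.get?_empty]

theorem pv_rank_keys : pvRank.keys = pvHints := by decide

theorem pv_matD_keys_nodup_aux (cols : List String) :
    ∀ (d : PySem.Dict String String), d.keys.Nodup →
      (cols.foldl (fun d c =>
        let lc := PySem.Str.lower c
        if pvRank.contains lc then d.insert lc c else d) d).keys.Nodup := by
  induction cols with
  | nil => intro d hd; simpa using hd
  | cons c t ih =>
      intro d hd
      simp only [List.foldl_cons]
      refine ih _ ?_
      by_cases hr : pvRank.contains (PySem.Str.lower c) = true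
      · simp only [hr, if_true]; exact PySem.Dict.nodup_keys_insert _ _ _ hd
      · simp only [Bool.not_eq_true] at hr; simp [hr, hd]

-- the sorted key list is exactly the hints that matched, in hint order
theorem pv_sorted_keys (columns : List String) :
    PySem.List.sorted (pvMatD columns).keys (fun k => pvRank.getD k 0) false
      = pvHints.filter (fun h => (pvMatD columns).contains h) := by
  refine PySem.List.sorted_eq_of_perm_of_pairwise_lt _ _ (fun k => pvRank.getD k 0) ?_ ?_
  · -- permutation: same members, both Nodup
    have hnk : (pvMatD columns).keys.Nodup :=
      pv_matD_keys_nodup_aux columns PySem.Dict.empty (by simp [PySem.Dict.keys_empty])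
    have hnf : (pvHints.filter (fun h => (pvMatD columns).contains h)).Nodup :=
      (by decide : pvHints.Nodup).filter _
    rw [List.perm_ext_iff_of_nodup hnf hnk]
    intro a
    simp only [List.mem_filter, ← PySem.Dict.contains_iff_mem_keys]
    constructor
    · rintro ⟨_, hc⟩; exact hc
    · intro hc
      refine ⟨?_, hc⟩
      have := pv_matD_rel columns a
      rw [PySem.Dict.contains_eq_isSome_get?, this] at hc
      by_cases hr : pvRank.contains a = true
      · rw [← pv_rank_keys]; exact (PySem.Dict.contains_iff_mem_keys _ _).mp hr
      · simp only [Bool.not_eq_true] at hr; simp [hr] at hc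
  · -- strictly increasing ranks along the filtered hint list
    have hp : pvHints.Pairwise (fun a b => pvRank.getD a 0 < pvRank.getD b 0) := by decide
    exact hp.sublist List.filter_sublist

-- mapping lookups over the matched hints = filterMap of A's lookups
theorem pv_map_filter (M L : PySem.Dict String String)
    (hML : ∀ h, h ∈ pvHints → M.get? h = L.get? h) :
    ∀ (l : List String), (∀ h ∈ l, h ∈ pvHints) →
      ((l.filter (fun h => M.contains h)).map (fun k => M.getD k ""))
        = l.filterMap (fun h => L.get? h) := by
  intro l
  induction l with
  | nil => intro _; rfl
  | cons h t ih =>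
      intro hsub
      have hm : M.get? h = L.get? h := hML h (hsub h (by simp))
      simp only [List.filter_cons, List.filterMap_cons]
      cases hd : L.get? h with
      | none =>
          have : M.contains h = false := by
            rw [PySem.Dict.contains_eq_isSome_get?, hm, hd]; rfl
          simp only [this, Bool.false_eq_true, if_false]
          exact ih (fun x hx => hsub x (by simp [hx]))
      | some v =>
          have hcon : M.contains h = true := by
            rw [PySem.Dict.contains_eq_isSome_get?, hm, hd]; rfl
          simp only [hcon, if_true, List.map_cons]
          rw [PySem.Dict.getD_eq_get?_getD, hm, hd]
          exact congrArg _ (ih (fun x hx => hsub x (by simp [hx])))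

-- picked (A) is Nodup, so the de-dup pass keeps it unchanged
theorem pv_picked_nodup (columns : List String) :
    (pvHints.filterMap (fun h => (pvLowD columns).get? h)).Nodup := by
  refine List.Nodup.filterMap ?_ (by decide)
  intro a a' b hb hb'
  simp only [Option.mem_def] at hb hb'
  have h1 := pv_lowD_inv columns a b hb
  have h2 := pv_lowD_inv columns a' b hb'
  rw [← h1, ← h2]

theorem pv_both_eq (columns : List String) :
    guess_text_columns_py columns = guess_text_columns_py_alt columns := by
  show pvDedupe
      (pvHints.foldl (fun acc hint =>
        if (pvLowD columns).contains hint then acc ++ [(pvLowD columns).getD hint ""] else acc) [])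
      PySem.Set.empty
    = (PySem.List.sorted (pvMatD columns).keys (fun k => pvRank.getD k 0) false).map
        (fun k => (pvMatD columns).getD k "")
  rw [pv_foldA (pvLowD columns) pvHints []]
  rw [List.nil_append]
  rw [pv_sorted_keys columns]
  rw [pv_map_filter (pvMatD columns) (pvLowD columns) ?_ pvHints (fun _ hx => hx)]
  · exact pv_dedupe_id _ _ (pv_picked_nodup columns) (by intro x _; simp [PySem.Set.empty])
  · intro h hh
    rw [pv_matD_rel columns h]
    have hc : pvRank.contains h = true := by
      rw [PySem.Dict.contains_iff_mem_keys, pv_rank_keys]; exact hh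
    simp [hc]

-- ===== VERDICT (by name: the statement is the Claim_ definition above) =====
theorem guess_text_columns_py_spec : Claim_equal_guess_text_columns_py := by
  intro columns _
  unfold Spec_guess_text_columns_py
  exact pv_both_eq columns
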